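-- pv_equiv track=rewrite | github.com/A-Mehdi/python-dataflow-analysis | transform.py | compareScopes
-- ===== SOURCE A (Python) =====
-- def compareScopes(scope1, scope2):
--     if scope1 == scope2:
--         return True
--
--     idx = 0
--
--     while idx < min(len(scope2), len(scope1)):
--         if scope2[idx] != scope1[idx]:
--             break
--         idx += 1
--
--     if scope2 == []:
--         return True
--     elif idx == len(scope2):
--         return True
--     else:
--         return False
-- ===== SOURCE B (Python) =====
-- def compareScopes(scope1, scope2):
--     return scope1[:len(scope2)] == scope2
-- ===== Notes on version B (the rewrite author's own statement) =====
-- stated objective: simpler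
-- what changed: Replaces the index-walking while loop with its break/min bookkeeping and the three-way special-case chain by a single prefix test: the slice of scope1 up to len(scope2) is compared with scope2.
import Mathlib
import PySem

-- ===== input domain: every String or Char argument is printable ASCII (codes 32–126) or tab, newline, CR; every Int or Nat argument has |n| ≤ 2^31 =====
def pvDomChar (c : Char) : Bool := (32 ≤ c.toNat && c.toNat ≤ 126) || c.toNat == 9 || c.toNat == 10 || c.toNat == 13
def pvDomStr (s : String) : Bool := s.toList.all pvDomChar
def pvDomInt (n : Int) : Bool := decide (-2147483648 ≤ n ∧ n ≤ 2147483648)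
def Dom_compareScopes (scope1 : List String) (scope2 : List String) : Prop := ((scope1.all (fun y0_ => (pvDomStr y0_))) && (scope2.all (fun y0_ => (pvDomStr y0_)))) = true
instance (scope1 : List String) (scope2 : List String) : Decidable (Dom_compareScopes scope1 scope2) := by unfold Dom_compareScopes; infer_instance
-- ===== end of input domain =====

-- B replaces A's index-walking loop and special cases by a single prefix test (same return value; no side effects).

-- ===== PORT A =====
-- the 'while idx < min(...)' loop of A: advances idx until mismatch or the bound
def compareScopesLoop (scope1 scope2 : List String) (idx : Nat) : Nat :=
  if idx < min scope2.length scope1.length then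
    if scope2[idx]! ≠ scope1[idx]! then idx
    else compareScopesLoop scope1 scope2 (idx + 1)
  else idx
termination_by min scope2.length scope1.length - idx

def compareScopes (scope1 : List String) (scope2 : List String) : Bool :=
  if scope1 = scope2 then true
  else
    let idx := compareScopesLoop scope1 scope2 0
    if scope2 = [] then true
    else if idx = scope2.length then true
    else false

-- ===== PORT B =====
def compareScopes_alt (scope1 : List String) (scope2 : List String) : Bool :=
  scope1.take scope2.length == scope2

-- ===== PRECONDITION & SPEC =====
def Spec_compareScopes (scope1 : List String) (scope2 : List String) (out : Bool) : Prop := out = compareScopes_alt scope1 scope2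
instance (scope1 : List String) (scope2 : List String) (out : Bool) : Decidable (Spec_compareScopes scope1 scope2 out) := by unfold Spec_compareScopes; infer_instance

-- ===== CLAIM (what is proved, stated in full; the proofs are below) =====
def Claim_equal_compareScopes : Prop := ∀ (scope1 : List String) (scope2 : List String), Dom_compareScopes scope1 scope2 → Spec_compareScopes scope1 scope2 (compareScopes scope1 scope2)

-- ===== LEMMAS AND PROOFS =====

-- The loop returns scope2.length exactly when (from position idx on) scope2 is still a prefix of scope1.
theorem compareScopesLoop_iff (scope1 scope2 : List String) :
    ∀ idx, idx ≤ min scope2.length scope1.length →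
      (compareScopesLoop scope1 scope2 idx = scope2.length ↔
        scope2.drop idx <+: scope1.drop idx) := by
  intro idx
  induction idx using compareScopesLoop.induct scope1 scope2 with
  | case1 idx hlt hne =>
    intro _
    rw [compareScopesLoop, if_pos hlt, if_pos hne]
    have h2 : idx < scope2.length := lt_of_lt_of_le hlt (Nat.min_le_left _ _)
    have h1 : idx < scope1.length := lt_of_lt_of_le hlt (Nat.min_le_right _ _)
    constructor
    · intro h; omega
    · intro h
      rw [List.drop_eq_getElem_cons h2, List.drop_eq_getElem_cons h1] at h
      rcases List.cons_prefix_cons.mp h with ⟨heq, _⟩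
      exact absurd (by rw [getElem!_pos scope2 idx h2, getElem!_pos scope1 idx h1, heq]) hne
  | case2 idx hlt hne ih =>
    intro _
    rw [compareScopesLoop, if_pos hlt, if_neg hne]
    have h2 : idx < scope2.length := lt_of_lt_of_le hlt (Nat.min_le_left _ _)
    have h1 : idx < scope1.length := lt_of_lt_of_le hlt (Nat.min_le_right _ _)
    rw [ih (by omega), List.drop_eq_getElem_cons h2, List.drop_eq_getElem_cons h1,
      List.cons_prefix_cons]
    have heq : scope2[idx] = scope1[idx] := by
      have := not_ne_iff.mp hne
      rwa [getElem!_pos scope2 idx h2, getElem!_pos scope1 idx h1] at this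
    simp [heq]
  | case3 idx hge =>
    intro hle
    rw [compareScopesLoop, if_neg hge]
    have : idx = min scope2.length scope1.length := by omega
    constructor
    · intro h
      have : scope2.drop idx = [] := by rw [List.drop_eq_nil_iff]; omega
      simp [this]
    · intro h
      by_contra hne
      have h2 : idx < scope2.length := by omega
      have h1 : scope1.drop idx = [] := by rw [List.drop_eq_nil_iff]; omega
      rw [h1, List.prefix_nil, List.drop_eq_nil_iff] at h
      omega

theorem compareScopes_eq (scope1 scope2 : List String) :
    compareScopes scope1 scope2 = compareScopes_alt scope1 scope2 := by
  unfold compareScopes compareScopes_alt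
  have hpfx : (scope1.take scope2.length == scope2) = true ↔ scope2 <+: scope1 := by
    rw [beq_iff_eq, List.prefix_iff_eq_take, eq_comm]
  by_cases h1 : scope1 = scope2
  · subst h1; simp [List.take_length]
  · rw [if_neg h1]
    by_cases h2 : scope2 = []
    · subst h2; simp
    · rw [if_neg h2]
      by_cases h3 : compareScopesLoop scope1 scope2 0 = scope2.length
      · rw [if_pos h3]
        exact (hpfx.mpr (by
          simpa using (compareScopesLoop_iff scope1 scope2 0 (Nat.zero_le _)).mp h3)).symm
      · rw [if_neg h3]
        symm
        rw [Bool.eq_false_iff]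
        intro hc
        exact h3 (by
          have := hpfx.mp hc
          exact (compareScopesLoop_iff scope1 scope2 0 (Nat.zero_le _)).mpr (by simpa using this))

-- ===== VERDICT (by name: the statement is the Claim_ definition above) =====
theorem compareScopes_spec : Claim_equal_compareScopes := by
  intro scope1 scope2 _
  exact compareScopes_eq scope1 scope2
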